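-- pv_equiv track=rewrite | github.com/gansiorag/NLP-russian-language | NLP_gansior/work_with_error/testFeuch.py | baseConcat
-- ===== SOURCE A (Python) =====
-- def baseConcat(dd:dict, ttt:list, key:int, ff1:int, ff2:int ):
--     """
--
--     """
--     indItem = 0
--     while indItem < len(ttt):
--         if len(ttt[indItem]) == ff1 and indItem <(len(ttt) - 1):
--             if len(ttt[indItem +1]) == ff2:
--                 frag = ttt[indItem] + ttt[indItem + 1]
--                 dd[key][frag] = ttt[indItem] + ' ' + ttt[indItem + 1]
--                 ttt[indItem] = frag
--                 ttt.pop(indItem + 1)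
--         indItem +=1
--     return dd, ttt
-- ===== SOURCE B (Python) =====
-- def baseConcat(dd: dict, ttt: list, key: int, ff1: int, ff2: int):
--     out = []
--     mapping = []
--     i = 0
--     n = len(ttt)
--     while i < n:
--         cur = ttt[i]
--         if len(cur) == ff1 and i + 1 < n and len(ttt[i + 1]) == ff2:
--             nxt = ttt[i + 1]
--             out.append(cur + nxt)
--             mapping.append((cur + nxt, cur + ' ' + nxt))
--             i += 2
--         else:
--             out.append(cur)
--             i += 1
--     if mapping:
--         dd[key].update(mapping)
--     ttt[:] = out
--     return dd, ttt
-- ===== Notes on version B (the rewrite author's own statement) =====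
-- stated objective: alternative
-- what changed: B replaces A's in-place while-loop that pops the consumed neighbour out of the list (shifting the tail) and re-reads the shrinking list with a single left-to-right pass over the original list that builds a fresh output list and skips the consumed element by advancing the index by 2, collecting the fragment mapping in a list and applying it to dd[key] once at the end; Pre_ only excludes the inputs where both programs raise KeyError (a merge fires while key is missing from dd).
import Mathlib
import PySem

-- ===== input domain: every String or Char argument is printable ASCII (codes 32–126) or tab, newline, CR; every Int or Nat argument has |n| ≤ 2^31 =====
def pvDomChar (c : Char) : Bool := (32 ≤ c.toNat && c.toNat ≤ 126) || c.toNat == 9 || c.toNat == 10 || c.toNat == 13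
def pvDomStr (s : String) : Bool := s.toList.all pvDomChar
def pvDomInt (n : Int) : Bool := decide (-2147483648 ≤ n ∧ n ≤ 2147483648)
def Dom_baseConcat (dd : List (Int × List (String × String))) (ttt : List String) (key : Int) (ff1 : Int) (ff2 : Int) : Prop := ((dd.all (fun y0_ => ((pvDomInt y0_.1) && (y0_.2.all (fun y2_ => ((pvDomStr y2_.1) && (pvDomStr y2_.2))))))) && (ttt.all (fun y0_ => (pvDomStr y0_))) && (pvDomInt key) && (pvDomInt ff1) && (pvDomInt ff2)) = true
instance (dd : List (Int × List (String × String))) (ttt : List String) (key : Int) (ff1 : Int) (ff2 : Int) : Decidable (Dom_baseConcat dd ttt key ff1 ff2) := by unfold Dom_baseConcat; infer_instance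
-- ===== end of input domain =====

-- B replaces A's in-place merge loop (which pops the consumed neighbour out of the list) by a
-- single pass that builds a fresh output list and skips the consumed element by advancing the
-- index by 2; equivalence is about the RETURN value (both Pythons also mutate dd and ttt, with
-- the same final contents).

-- ===== PORT A =====
-- dd[key][frag] = v  (when key is absent Python raises KeyError; Pre_ excludes that case,
-- where this total model would instead insert a fresh entry)
def pyDictSet (dd : List (Int × List (String × String))) (key : Int) (frag v : String) :
    List (Int × List (String × String)) :=
  ((PySem.Dict.mk dd).modify key [] (fun inner => ((PySem.Dict.mk inner).insert frag v).items)).items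

def baseConcatLoop (key ff1 ff2 : Int)
    (dd : List (Int × List (String × String))) (ttt : List String) (i : Nat) :
    List (Int × List (String × String)) × List String :=
  if h : i < ttt.length then
    if h1 : PySem.Str.len (ttt.getD i "") = ff1 ∧ i + 1 < ttt.length then
      if h2 : PySem.Str.len (ttt.getD (i + 1) "") = ff2 then
        let frag := ttt.getD i "" ++ ttt.getD (i + 1) ""
        baseConcatLoop key ff1 ff2
          (pyDictSet dd key frag (ttt.getD i "" ++ " " ++ ttt.getD (i + 1) ""))
          ((ttt.set i frag).eraseIdx (i + 1)) (i + 1)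
      else baseConcatLoop key ff1 ff2 dd ttt (i + 1)
    else baseConcatLoop key ff1 ff2 dd ttt (i + 1)
  else (dd, ttt)
termination_by ttt.length - i
decreasing_by
  · simp [List.length_eraseIdx, List.length_set, h1.2]; omega
  · omega
  · omega

def baseConcat (dd : List (Int × List (String × String))) (ttt : List String) (key : Int) (ff1 : Int) (ff2 : Int) : (List (Int × List (String × String))) × List String :=
  baseConcatLoop key ff1 ff2 dd ttt 0

-- ===== PORT B =====
def altLoop (ff1 ff2 : Int) (ttt : List String) (i : Nat)
    (out : List String) (mp : List (String × String)) :
    List String × List (String × String) :=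
  if _h : i < ttt.length then
    let cur := ttt.getD i ""
    if PySem.Str.len cur = ff1 ∧ i + 1 < ttt.length ∧ PySem.Str.len (ttt.getD (i + 1) "") = ff2 then
      let nxt := ttt.getD (i + 1) ""
      altLoop ff1 ff2 ttt (i + 2) (out ++ [cur ++ nxt]) (mp ++ [(cur ++ nxt, cur ++ " " ++ nxt)])
    else
      altLoop ff1 ff2 ttt (i + 1) (out ++ [cur]) mp
  else (out, mp)
termination_by ttt.length - i

def baseConcat_alt (dd : List (Int × List (String × String))) (ttt : List String) (key : Int) (ff1 : Int) (ff2 : Int) : (List (Int × List (String × String))) × List String :=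
  let r := altLoop ff1 ff2 ttt 0 [] []
  let dd' := if r.2 = [] then dd
    else ((PySem.Dict.mk dd).modify key [] (fun inner => ((PySem.Dict.mk inner).update r.2).items)).items
  (dd', r.1)

-- ===== PRECONDITION & SPEC =====
-- Pre_ excludes exactly the inputs on which Python A raises KeyError: some adjacent pair of ttt
-- has lengths (ff1, ff2) — so a merge fires — while key is not a key of dd.  (B raises there too.)
def Pre_baseConcat (dd : List (Int × List (String × String))) (ttt : List String) (key : Int) (ff1 : Int) (ff2 : Int) : Prop :=
  (∃ p ∈ dd, p.1 = key) ∨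
  ¬ ∃ i < ttt.length - 1, PySem.Str.len (ttt.getD i "") = ff1 ∧ PySem.Str.len (ttt.getD (i + 1) "") = ff2
instance (dd : List (Int × List (String × String))) (ttt : List String) (key : Int) (ff1 : Int) (ff2 : Int) : Decidable (Pre_baseConcat dd ttt key ff1 ff2) := by unfold Pre_baseConcat; infer_instance

def pvWitness_baseConcat : (List (Int × List (String × String))) × List String × Int × Int × Int :=
  ([(0, [("xy", "x y")])], (["ab", "c", "d"], 0, 2, 1))

def Spec_baseConcat (dd : List (Int × List (String × String))) (ttt : List String) (key : Int) (ff1 : Int) (ff2 : Int) (out : (List (Int × List (String × String))) × List String) : Prop := out = baseConcat_alt dd ttt key ff1 ff2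
instance (dd : List (Int × List (String × String))) (ttt : List String) (key : Int) (ff1 : Int) (ff2 : Int) (out : (List (Int × List (String × String))) × List String) : Decidable (Spec_baseConcat dd ttt key ff1 ff2 out) := by unfold Spec_baseConcat; infer_instance

-- ===== CLAIM (what is proved, stated in full; the proofs are below) =====
def Claim_equal_baseConcat : Prop := ∀ (dd : List (Int × List (String × String))) (ttt : List String) (key : Int) (ff1 : Int) (ff2 : Int), Dom_baseConcat dd ttt key ff1 ff2 → Pre_baseConcat dd ttt key ff1 ff2 → Spec_baseConcat dd ttt key ff1 ff2 (baseConcat dd ttt key ff1 ff2)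

-- ===== LEMMAS AND PROOFS =====

-- the common pure recursion: greedy left-to-right merge of adjacent (ff1, ff2)-length pairs,
-- returning the merged list and the (fragment, spaced fragment) pairs in merge order
def mergeRec (ff1 ff2 : Int) : List String → List String × List (String × String)
  | [] => ([], [])
  | [x] => ([x], [])
  | x :: y :: rs =>
    if PySem.Str.len x = ff1 ∧ PySem.Str.len y = ff2 then
      ((x ++ y) :: (mergeRec ff1 ff2 rs).1, (x ++ y, x ++ " " ++ y) :: (mergeRec ff1 ff2 rs).2)
    else
      (x :: (mergeRec ff1 ff2 (y :: rs)).1, (mergeRec ff1 ff2 (y :: rs)).2)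

theorem getD_append_len {α : Type} (out rest : List α) (k : Nat) (d : α) :
    (out ++ rest).getD (out.length + k) d = rest.getD k d := by
  simp [List.getD, List.getElem?_append_right]

theorem set_append_len {α : Type} (out rest : List α) (v : α) :
    (out ++ rest).set out.length v = out ++ rest.set 0 v := by
  induction out with
  | nil => rfl
  | cons a l ih => simp [ih]

theorem eraseIdx_append_len {α : Type} (out rest : List α) (k : Nat) :
    (out ++ rest).eraseIdx (out.length + k) = out ++ rest.eraseIdx k := by
  induction out with
  | nil => simp
  | cons a l ih => simpa [List.eraseIdx, Nat.succ_add] using ih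

theorem loopA_eq (key ff1 ff2 : Int) (rest out : List String)
    (dd : List (Int × List (String × String))) :
    baseConcatLoop key ff1 ff2 dd (out ++ rest) out.length
    = ((mergeRec ff1 ff2 rest).2.foldl (fun d p => pyDictSet d key p.1 p.2) dd,
       out ++ (mergeRec ff1 ff2 rest).1) := by
  rw [baseConcatLoop]
  cases rest with
  | nil =>
    rw [dif_neg (by simp)]
    simp [mergeRec]
  | cons x tl =>
    have hlt : out.length < (out ++ x :: tl).length := by simp
    rw [dif_pos hlt]
    have hx : (out ++ x :: tl).getD out.length "" = x := by
      have h0 := getD_append_len out (x :: tl) 0 ""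
      simpa using h0
    cases tl with
    | nil =>
      have hn1 : ¬ (out.length + 1 < (out ++ [x]).length) := by simp
      rw [dif_neg (fun hh => hn1 hh.2)]
      have hrec := loopA_eq key ff1 ff2 [] (out ++ [x]) dd
      simp only [List.append_nil, mergeRec, List.foldl_nil, List.length_append,
        List.length_cons, List.length_nil] at hrec
      simpa [mergeRec] using hrec
    | cons y rs =>
      have hy : (out ++ x :: y :: rs).getD (out.length + 1) "" = y := by
        have h1 := getD_append_len out (x :: y :: rs) 1 ""
        simpa using h1
      have hlen2 : out.length + 1 < (out ++ x :: y :: rs).length := by simp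
      by_cases h1 : PySem.Str.len x = ff1
      · rw [dif_pos ⟨by rw [hx]; exact h1, hlen2⟩]
        by_cases h2 : PySem.Str.len y = ff2
        · rw [dif_pos (by rw [hy]; exact h2)]
          have hlist : ((out ++ x :: y :: rs).set out.length (x ++ y)).eraseIdx (out.length + 1)
              = (out ++ [x ++ y]) ++ rs := by
            rw [set_append_len, show ((x :: y :: rs).set 0 (x ++ y)) = (x ++ y) :: y :: rs from rfl,
              eraseIdx_append_len out ((x ++ y) :: y :: rs) 1]
            simp [List.eraseIdx]
          have hrec := loopA_eq key ff1 ff2 rs (out ++ [x ++ y])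
            (pyDictSet dd key (x ++ y) (x ++ " " ++ y))
          simp only [List.length_append, List.length_cons, List.length_nil] at hrec
          simp only [hx, hy, hlist]
          rw [hrec]
          simp only [mergeRec]
          rw [if_pos ⟨h1, h2⟩]
          simp [List.append_assoc]
        · rw [dif_neg (by rw [hy]; exact h2)]
          have hrec := loopA_eq key ff1 ff2 (y :: rs) (out ++ [x]) dd
          simp only [List.length_append, List.length_cons, List.length_nil,
            List.append_assoc, List.cons_append, List.nil_append] at hrec
          rw [hrec]
          have hn : ¬ (PySem.Str.len x = ff1 ∧ PySem.Str.len y = ff2) := fun hh => h2 hh.2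
          simp only [mergeRec]
          rw [if_neg hn]
      · rw [dif_neg (fun hh => h1 (by rw [hx] at hh; exact hh.1))]
        have hrec := loopA_eq key ff1 ff2 (y :: rs) (out ++ [x]) dd
        simp only [List.length_append, List.length_cons, List.length_nil,
          List.append_assoc, List.cons_append, List.nil_append] at hrec
        rw [hrec]
        have hn : ¬ (PySem.Str.len x = ff1 ∧ PySem.Str.len y = ff2) := fun hh => h1 hh.1
        simp only [mergeRec]
        rw [if_neg hn]
termination_by rest.length

theorem altLoop_eq (ff1 ff2 : Int) (ttt : List String) (i : Nat)
    (out : List String) (mp : List (String × String)) :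
    altLoop ff1 ff2 ttt i out mp
    = (out ++ (mergeRec ff1 ff2 (ttt.drop i)).1, mp ++ (mergeRec ff1 ff2 (ttt.drop i)).2) := by
  rw [altLoop]
  by_cases h : i < ttt.length
  · rw [dif_pos h]
    have hget0 : ttt.getD i "" = (ttt.drop i).getD 0 "" := by
      simp [List.getD, List.getElem?_drop]
    have hget1 : ttt.getD (i + 1) "" = (ttt.drop i).getD 1 "" := by
      simp [List.getD, List.getElem?_drop]
    have hlen : (ttt.drop i).length = ttt.length - i := by simp
    cases hd : ttt.drop i with
    | nil => rw [hd] at hlen; simp at hlen; omega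
    | cons x tl =>
      have hx : ttt.getD i "" = x := by rw [hget0, hd]; rfl
      rw [hd] at hlen
      cases tl with
      | nil =>
        have hnot : ¬ (i + 1 < ttt.length) := by simp at hlen; omega
        rw [if_neg (fun hh => hnot hh.2.1)]
        rw [altLoop_eq ff1 ff2 ttt (i + 1)]
        have hdrop1 : ttt.drop (i + 1) = [] := List.drop_eq_nil_of_le (by omega)
        rw [hdrop1]
        simp only [List.getD] at hx
        simp [mergeRec, hx]
      | cons y rs =>
        have hy : ttt.getD (i + 1) "" = y := by rw [hget1, hd]; rfl
        have hlen2 : i + 1 < ttt.length := by simp at hlen; omega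
        have hdrop1 : ttt.drop (i + 1) = y :: rs := by
          have : ttt.drop (i + 1) = (ttt.drop i).drop 1 := by
            rw [List.drop_drop]
          rw [this, hd]; rfl
        have hdrop2 : ttt.drop (i + 2) = rs := by
          have : ttt.drop (i + 2) = (ttt.drop i).drop 2 := by
            rw [List.drop_drop]
          rw [this, hd]; rfl
        by_cases hc : PySem.Str.len x = ff1 ∧ PySem.Str.len y = ff2
        · rw [if_pos ⟨by rw [hx]; exact hc.1, hlen2, by rw [hy]; exact hc.2⟩]
          rw [altLoop_eq ff1 ff2 ttt (i + 2)]
          rw [hdrop2]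
          simp only [mergeRec]
          rw [if_pos hc]
          simp only [List.getD] at hx hy
          simp [hx, hy, List.append_assoc]
        · rw [if_neg (fun hh => hc ⟨by rw [← hx]; exact hh.1, by rw [← hy]; exact hh.2.2⟩)]
          rw [altLoop_eq ff1 ff2 ttt (i + 1)]
          rw [hdrop1]
          simp only [mergeRec]
          rw [if_neg hc]
          simp only [List.getD] at hx
          simp [hx]
  · rw [dif_neg h]
    have hdrop : ttt.drop i = [] := List.drop_eq_nil_of_le (by omega)
    rw [hdrop]
    simp [mergeRec]
termination_by ttt.length - i

theorem modify_modify {κ ν : Type} [BEq κ] [LawfulBEq κ]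
    (d : PySem.Dict κ ν) (k : κ) (d0 d0' : ν) (f g : ν → ν) :
    (d.modify k d0 f).modify k d0' g = d.modify k d0 (fun x => g (f x)) := by
  simp [PySem.Dict.modify, PySem.Dict.getD_insert_self, PySem.Dict.insert_insert_self]

theorem foldl_modify_insert (key : Int) (mp : List (String × String)) (hne : mp ≠ [])
    (D : PySem.Dict Int (List (String × String))) :
    mp.foldl (fun D p => D.modify key [] (fun inner => ((PySem.Dict.mk inner).insert p.1 p.2).items)) D
    = D.modify key [] (fun inner => ((PySem.Dict.mk inner).update mp).items) := by
  induction mp generalizing D with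
  | nil => exact absurd rfl hne
  | cons p rest ih =>
    rcases eq_or_ne rest [] with h | h
    · subst h
      simp [PySem.Dict.update]
    · rw [List.foldl_cons, ih h, modify_modify]
      simp [PySem.Dict.update]

theorem foldl_pyDictSet_lift (key : Int) (mp : List (String × String))
    (D : PySem.Dict Int (List (String × String))) :
    mp.foldl (fun d p => pyDictSet d key p.1 p.2) D.items
    = (mp.foldl (fun D p => D.modify key [] (fun inner => ((PySem.Dict.mk inner).insert p.1 p.2).items)) D).items := by
  induction mp generalizing D with
  | nil => rfl
  | cons p rest ih =>
    rw [List.foldl_cons, List.foldl_cons]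
    exact ih (D.modify key [] (fun inner => ((PySem.Dict.mk inner).insert p.1 p.2).items))

theorem foldl_pyDictSet (key : Int) (mp : List (String × String))
    (dd : List (Int × List (String × String))) :
    mp.foldl (fun d p => pyDictSet d key p.1 p.2) dd
    = if mp = [] then dd
      else ((PySem.Dict.mk dd).modify key [] (fun inner => ((PySem.Dict.mk inner).update mp).items)).items := by
  rcases eq_or_ne mp [] with h | h
  · subst h; simp
  · rw [if_neg h, ← foldl_modify_insert key mp h (PySem.Dict.mk dd)]
    exact foldl_pyDictSet_lift key mp (PySem.Dict.mk dd)

-- ===== VERDICT (by name: the statement is the Claim_ definition above) =====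
theorem baseConcat_spec : Claim_equal_baseConcat := by
  intro dd ttt key ff1 ff2 _ _
  unfold Spec_baseConcat baseConcat baseConcat_alt
  have hA := loopA_eq key ff1 ff2 ttt [] dd
  simp only [List.nil_append, List.length_nil] at hA
  rw [hA, altLoop_eq]
  simp only [List.drop_zero, List.nil_append]
  rw [foldl_pyDictSet]
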